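-- pv_equiv track=rewrite | github.com/Mudhunuri-Srivalli/stack | problem solving 20.9.py | check_duplicate_digits
-- ===== SOURCE A (Python) =====
-- def check_duplicate_digits(nums):
--     result = []
--     for num in nums:
--         digits = str(num)         # Convert number to string
--         if len(set(digits)) < len(digits):
--             result.append(True)    # Duplicate found
--         else:
--             result.append(False)   # All digits unique
--     return result
-- ===== SOURCE B (Python) =====
-- def _has_adjacent_dup(chars):
--     for a, b in zip(chars, chars[1:]):
--         if a == b:
--             return True
--     return False
--
--
-- def check_duplicate_digits(nums):
--     out = []
--     for num in nums:
--         out.append(_has_adjacent_dup(sorted(str(num))))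
--     return out
-- ===== Notes on version B (the rewrite author's own statement) =====
-- stated objective: alternative
-- what changed: Replaces the set-cardinality comparison (len(set(s)) < len(s)) with sorting the characters of str(num) and scanning once for an equal adjacent pair, returning early on the first hit.
import Mathlib
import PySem

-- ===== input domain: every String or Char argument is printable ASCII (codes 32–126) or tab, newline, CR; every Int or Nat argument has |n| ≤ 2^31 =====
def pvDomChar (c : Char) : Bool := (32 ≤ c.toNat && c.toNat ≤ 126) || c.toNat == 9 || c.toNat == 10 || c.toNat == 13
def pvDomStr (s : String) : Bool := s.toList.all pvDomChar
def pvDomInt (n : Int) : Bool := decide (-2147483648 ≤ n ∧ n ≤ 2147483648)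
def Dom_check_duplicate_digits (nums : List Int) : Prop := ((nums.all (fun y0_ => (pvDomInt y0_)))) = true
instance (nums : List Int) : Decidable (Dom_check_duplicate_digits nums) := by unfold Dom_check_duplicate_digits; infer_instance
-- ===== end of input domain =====

-- B sorts the characters of str(num) and scans for an equal adjacent pair instead of
-- comparing len(set(digits)) with len(digits); same return value, a different algorithm.

-- ===== PORT A =====
def check_duplicate_digits (nums : List Int) : List Bool :=
  nums.foldl (fun result num =>
    let digits := PySem.Int.toChars num
    if (PySem.Set.ofList digits).length < digits.length then
      result ++ [true]
    else
      result ++ [false]) []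

-- ===== PORT B =====
-- for a, b in zip(chars, chars[1:]): if a == b: return True / return False
def pvAdjDup : List Char → Bool
  | a :: b :: rest => if a == b then true else pvAdjDup (b :: rest)
  | _ => false

def check_duplicate_digits_alt (nums : List Int) : List Bool :=
  nums.foldl (fun out num =>
    out ++ [pvAdjDup (PySem.List.sorted (PySem.Int.toChars num) (fun c => c))]) []

-- ===== PRECONDITION & SPEC =====
def Spec_check_duplicate_digits (nums : List Int) (out : List Bool) : Prop := out = check_duplicate_digits_alt nums
instance (nums : List Int) (out : List Bool) : Decidable (Spec_check_duplicate_digits nums out) := by unfold Spec_check_duplicate_digits; infer_instance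

-- ===== CLAIM (what is proved, stated in full; the proofs are below) =====
def Claim_equal_check_duplicate_digits : Prop := ∀ (nums : List Int), Dom_check_duplicate_digits nums → Spec_check_duplicate_digits nums (check_duplicate_digits nums)

-- ===== LEMMAS AND PROOFS =====

-- On a list sorted into nondecreasing order, an adjacent duplicate exists iff the list has a repeat.
theorem pvAdjDup_iff_not_nodup (l : List Char) (h : l.Pairwise (· ≤ ·)) :
    pvAdjDup l = true ↔ ¬ l.Nodup := by
  induction l with
  | nil => simp [pvAdjDup]
  | cons a t ih =>
    cases t with
    | nil => simp [pvAdjDup]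
    | cons b r =>
      have hpw : (b :: r).Pairwise (· ≤ ·) := h.tail
      by_cases hab : a = b
      · subst hab
        simp [pvAdjDup, List.Nodup]
      · have hanotin : a ∉ b :: r := by
          intro hmem
          rcases List.mem_cons.mp hmem with heq | hr
          · exact hab heq
          · have hab' : a ≤ b := (List.pairwise_cons.mp h).1 b (List.mem_cons_self ..)
            have hba : b ≤ a := (List.pairwise_cons.mp hpw).1 a hr
            exact hab (le_antisymm hab' hba)
        have : pvAdjDup (a :: b :: r) = pvAdjDup (b :: r) := by
          simp [pvAdjDup, hab]
        rw [this, ih hpw]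
        simp [List.nodup_cons, hanotin]

theorem pvSetLt_iff_not_nodup (l : List Char) :
    ((PySem.Set.ofList l).length < l.length) ↔ ¬ l.Nodup := by
  constructor
  · intro hlt hnd
    rw [PySem.Set.ofList_eq_self_of_nodup l hnd] at hlt
    exact lt_irrefl _ hlt
  · intro hnd
    have hperm : (PySem.Set.ofList l).Perm l.dedup :=
      (List.perm_ext_iff_of_nodup (PySem.Set.nodup_ofList l) l.nodup_dedup).mpr
        (by intro a; rw [PySem.Set.mem_ofList, List.mem_dedup])
    have h1 : List.Sublist l.dedup l := l.dedup_sublist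
    have h2 : l.dedup ≠ l := fun he => hnd (he ▸ l.nodup_dedup)
    have h3 : l.dedup.length < l.length :=
      lt_of_le_of_ne h1.length_le (fun he => h2 (h1.eq_of_length he))
    rw [hperm.length_eq]; exact h3

theorem pv_pointwise (num : Int) :
    decide ((PySem.Set.ofList (PySem.Int.toChars num)).length < (PySem.Int.toChars num).length)
      = pvAdjDup (PySem.List.sorted (PySem.Int.toChars num) (fun c => c)) := by
  set l := PySem.Int.toChars num with hl
  have hperm := PySem.List.sorted_perm l (fun c => c) false
  have hnodup : (PySem.List.sorted l (fun c => c)).Nodup ↔ l.Nodup := hperm.nodup_iff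
  have hadj := pvAdjDup_iff_not_nodup _ (PySem.List.sorted_pairwise l (fun c => c))
  by_cases hnd : l.Nodup
  · have h1 : ¬ ((PySem.Set.ofList l).length < l.length) := by
      rw [pvSetLt_iff_not_nodup]; simpa using hnd
    have h2 : pvAdjDup (PySem.List.sorted l (fun c => c)) = false := by
      rcases Bool.eq_false_or_eq_true (pvAdjDup (PySem.List.sorted l (fun c => c))) with h | h
      · exact absurd (hnodup.mpr hnd) (hadj.mp h)
      · exact h
    simp [h1, h2]
  · have h1 : (PySem.Set.ofList l).length < l.length := (pvSetLt_iff_not_nodup l).mpr hnd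
    have h2 : pvAdjDup (PySem.List.sorted l (fun c => c)) = true := by
      apply hadj.mpr; rw [hnodup]; exact hnd
    simp [h1, h2]

-- ===== VERDICT (by name: the statement is the Claim_ definition above) =====
theorem check_duplicate_digits_spec : Claim_equal_check_duplicate_digits := by
  intro nums _
  unfold Spec_check_duplicate_digits check_duplicate_digits check_duplicate_digits_alt
  have hA : (fun (result : List Bool) (num : Int) =>
      let digits := PySem.Int.toChars num
      if (PySem.Set.ofList digits).length < digits.length then result ++ [true]
      else result ++ [false])
      = (fun (result : List Bool) (num : Int) =>
          result ++ [decide ((PySem.Set.ofList (PySem.Int.toChars num)).length < (PySem.Int.toChars num).length)]) := by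
    funext result num
    by_cases h : (PySem.Set.ofList (PySem.Int.toChars num)).length < (PySem.Int.toChars num).length <;> simp [h]
  rw [hA, PySem.List.foldl_append_singleton_eq_map, PySem.List.foldl_append_singleton_eq_map]
  simp only [List.nil_append]
  exact List.map_congr_left (fun a _ => pv_pointwise a)
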